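-- pv_equiv track=rewrite | github.com/RossCradock/pricethenews | articles.py | orderArticles
-- ===== SOURCE A (Python) =====
-- def orderArticles(articles, search_term_queried):
--     # if the SUBTITLE contains the first keyword then
--     for article in articles:
--         if  search_term_queried in article['subtitle']:
--             articles.insert(0, articles.pop(articles.index(article)))
--
--     # if the TITLE contains the first keyword then
--     for article in articles:
--         if search_term_queried in article['title']:
--             articles.insert(0, articles.pop(articles.index(article)))
--     return articles
-- ===== SOURCE B (Python) =====
-- def orderArticles(articles, search_term_queried):
--     # Partition per key and rebuild: matches (reversed, so the last match ends up
--     # frontmost, as the move-to-front loop produces) followed by non-matches.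
--     # Slice assignment keeps the same list object mutated in place, like A.
--     for key in ('subtitle', 'title'):
--         matched = [a for a in articles if search_term_queried in a[key]]
--         rest = [a for a in articles if search_term_queried not in a[key]]
--         articles[:] = list(reversed(matched)) + rest
--     return articles
-- ===== Notes on version B (the rewrite author's own statement) =====
-- stated objective: simpler
-- what changed: Replaces the in-place index/pop/insert move-to-front loops (each index lookup a linear scan, O(n^2) per pass) with two filter passes per key that rebuild the list as reversed-matches ++ non-matches in O(n) list work.
import Mathlib
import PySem

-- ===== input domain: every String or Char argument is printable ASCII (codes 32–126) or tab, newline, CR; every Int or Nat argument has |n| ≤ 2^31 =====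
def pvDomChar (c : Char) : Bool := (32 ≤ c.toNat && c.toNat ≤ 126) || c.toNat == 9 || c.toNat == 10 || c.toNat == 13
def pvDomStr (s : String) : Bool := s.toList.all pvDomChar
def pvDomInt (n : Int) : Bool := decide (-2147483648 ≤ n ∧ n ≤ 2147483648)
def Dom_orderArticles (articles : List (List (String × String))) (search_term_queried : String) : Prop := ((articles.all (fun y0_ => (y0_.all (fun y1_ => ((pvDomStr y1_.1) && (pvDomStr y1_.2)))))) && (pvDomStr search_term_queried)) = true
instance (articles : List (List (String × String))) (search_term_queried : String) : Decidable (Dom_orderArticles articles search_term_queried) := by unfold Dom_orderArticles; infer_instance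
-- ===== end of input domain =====

-- B replaces A's in-place index/pop/insert move-to-front loops with two filter passes per key
-- (reversed matches ++ non-matches); objective: simpler. Python B mutates the list in place
-- via slice assignment, like A; the equivalence proved here is about the return value.

-- ===== PORT A =====
-- 'search_term_queried in article[key]' (KeyError when the key is missing → Pre_; default here is unreachable inside Pre_)
def pvMatch (term key : String) (a : List (String × String)) : Bool :=
  PySem.Str.isIn term ((PySem.Dict.get? ⟨a⟩ key).getD "")

-- one 'for article in articles: if match: articles.insert(0, articles.pop(articles.index(article)))' loop,
-- iterating the Python iterator index i over the mutating list (length is preserved by pop+insert)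
def orderArticlesPass (term key : String) (i : Nat) (xs : List (List (String × String))) : List (List (String × String)) :=
  if h : i < xs.length then
    if pvMatch term key xs[i] then
      match PySem.List.index? xs xs[i] with
      | some j =>
        match hp : PySem.List.pop? xs (j : Int) with
        | some r => orderArticlesPass term key (i+1) (PySem.List.insert r.2 0 r.1)
        | none => xs
      | none => xs
    else orderArticlesPass term key (i+1) xs
  else xs
termination_by xs.length - i
decreasing_by
  · have := PySem.List.length_of_pop?_eq_some (xs := xs) (i := (j : Int)) (r := r) hp
    simp [PySem.List.insert_zero]; omega
  · omega

def orderArticles (articles : List (List (String × String))) (search_term_queried : String) : List (List (String × String)) :=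
  orderArticlesPass search_term_queried "title" 0
    (orderArticlesPass search_term_queried "subtitle" 0 articles)

-- ===== PORT B =====
-- one pass of Source B: matched (reversed) ++ rest
def orderArticlesAltPass (term key : String) (xs : List (List (String × String))) : List (List (String × String)) :=
  (xs.filter (pvMatch term key)).reverse ++ xs.filter (fun a => !pvMatch term key a)

def orderArticles_alt (articles : List (List (String × String))) (search_term_queried : String) : List (List (String × String)) :=
  orderArticlesAltPass search_term_queried "title"
    (orderArticlesAltPass search_term_queried "subtitle" articles)

-- ===== PRECONDITION & SPEC =====
-- Pre_ excludes (a) articles missing a 'title' or 'subtitle' key, on which A raises KeyError,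
-- (b) association lists with a repeated key, which do not denote a Python dict faithfully, and
-- (c) lists containing two ==-equal (as dicts, i.e. up to pair permutation) articles, on which
-- the order A produces is an accident of articles.index finding the earlier duplicate while the
-- iterator has moved on; B does the natural move-to-front there.
def Pre_orderArticles (articles : List (List (String × String))) (search_term_queried : String) : Prop :=
  (∀ a ∈ articles, (a.map Prod.fst).Nodup ∧ "title" ∈ a.map Prod.fst ∧ "subtitle" ∈ a.map Prod.fst) ∧
  articles.Pairwise (fun a b => ¬ a.Perm b)
instance (articles : List (List (String × String))) (search_term_queried : String) : Decidable (Pre_orderArticles articles search_term_queried) := by unfold Pre_orderArticles; infer_instance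

def pvWitness_orderArticles : (List (List (String × String))) × String :=
  ([[("title", ""), ("subtitle", "")]], "")

def Spec_orderArticles (articles : List (List (String × String))) (search_term_queried : String) (out : List (List (String × String))) : Prop := out = orderArticles_alt articles search_term_queried
instance (articles : List (List (String × String))) (search_term_queried : String) (out : List (List (String × String))) : Decidable (Spec_orderArticles articles search_term_queried out) := by unfold Spec_orderArticles; infer_instance

-- ===== CLAIM (what is proved, stated in full; the proofs are below) =====
def Claim_equal_orderArticles : Prop := ∀ (articles : List (List (String × String))) (search_term_queried : String), Dom_orderArticles articles search_term_queried → Pre_orderArticles articles search_term_queried → Spec_orderArticles articles search_term_queried (orderArticles articles search_term_queried)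

-- ===== LEMMAS AND PROOFS =====

-- erasing the element just found at the boundary of a known prefix
lemma pv_eraseIdx_append_cons (pre suf : List (List (String × String))) (v : List (String × String)) :
    (pre ++ v :: suf).eraseIdx pre.length = pre ++ suf := by
  induction pre with
  | nil => rfl
  | cons x t ih => simpa [List.eraseIdx] using ih

-- loop invariant for one A-pass: after processing the first i elements of the original ys,
-- the list is (matches among them, reversed) ++ (non-matches among them) ++ (rest of ys)
-- an element of a Nodup list does not occur before its own position
lemma pv_getElem_not_mem_take (l : List (List (String × String))) (i : Nat) (h : i < l.length)
    (hnd : l.Nodup) : l[i] ∉ l.take i := by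
  intro hm
  have hlen0 : 0 < (l.drop i).length := by simp [List.length_drop]; omega
  have h2 : l[i] ∈ l.drop i := by
    have e : (l.drop i)[0]'hlen0 = l[i] := by simp
    rw [← e]; exact List.getElem_mem hlen0
  have hsplit : (l.take i ++ l.drop i).Nodup := by rw [List.take_append_drop]; exact hnd
  have hdisj := (List.nodup_append.mp hsplit).2.2
  exact hdisj _ hm _ h2 rfl

-- the loop body when the iterator is past the end: returns the list unchanged
lemma pv_pass_done (term key : String) (ys : List (List (String × String))) (i : Nat)
    (hil : ys.length ≤ i) :
    orderArticlesPass term key i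
        (((ys.take i).filter (pvMatch term key)).reverse ++ (ys.take i).filter (fun a => !pvMatch term key a) ++ ys.drop i)
      = (ys.filter (pvMatch term key)).reverse ++ ys.filter (fun a => !pvMatch term key a) := by
  have htake : ys.take i = ys := List.take_of_length_le hil
  have hdrop : ys.drop i = [] := List.drop_eq_nil_of_le hil
  rw [htake, hdrop, orderArticlesPass, dif_neg]
  · simp
  · have := List.length_eq_length_filter_add (l := ys) (f := pvMatch term key)
    simp only [List.append_nil, List.length_append, List.length_reverse]
    omega

-- loop invariant for one A-pass: after processing the first i elements of the original ys,
-- the list is (matches among them, reversed) ++ (non-matches among them) ++ (rest of ys)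
lemma pv_pass_inv (term key : String) (ys : List (List (String × String))) (hnd : ys.Nodup) :
    ∀ n i xs, ys.length - i ≤ n →
      xs = ((ys.take i).filter (pvMatch term key)).reverse ++ (ys.take i).filter (fun a => !pvMatch term key a) ++ ys.drop i →
      orderArticlesPass term key i xs = (ys.filter (pvMatch term key)).reverse ++ ys.filter (fun a => !pvMatch term key a) := by
  intro n
  induction n with
  | zero =>
    intro i xs hn hxs
    subst hxs
    exact pv_pass_done term key ys i (by omega)
  | succ n ih =>
    intro i xs hn hxs
    subst hxs
    by_cases hi : i < ys.length
    case neg => exact pv_pass_done term key ys i (by omega)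
    case pos =>
    have htlen : (ys.take i).length = i := by simp [List.length_take]; omega
    have hflen := List.length_eq_length_filter_add (l := ys.take i) (f := pvMatch term key)
    have hpre_len : (((ys.take i).filter (pvMatch term key)).reverse ++ (ys.take i).filter (fun a => !pvMatch term key a)).length = i := by
      simp only [List.length_append, List.length_reverse]; omega
    have hdrop := List.drop_eq_getElem_cons hi
    have hL : ((ys.take i).filter (pvMatch term key)).reverse ++ (ys.take i).filter (fun a => !pvMatch term key a) ++ ys.drop i
        = (((ys.take i).filter (pvMatch term key)).reverse ++ (ys.take i).filter (fun a => !pvMatch term key a)) ++ ys[i] :: ys.drop (i + 1) := by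
      rw [hdrop]
    rw [hL]
    have hLlen : ((((ys.take i).filter (pvMatch term key)).reverse ++ (ys.take i).filter (fun a => !pvMatch term key a)) ++ ys[i] :: ys.drop (i + 1)).length = ys.length := by
      simp only [List.length_append, List.length_cons, List.length_drop, hpre_len]; omega
    have hilt : i < ((((ys.take i).filter (pvMatch term key)).reverse ++ (ys.take i).filter (fun a => !pvMatch term key a)) ++ ys[i] :: ys.drop (i + 1)).length := by omega
    have hgx : ((((ys.take i).filter (pvMatch term key)).reverse ++ (ys.take i).filter (fun a => !pvMatch term key a)) ++ ys[i] :: ys.drop (i + 1))[i]'hilt = ys[i] := by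
      rw [List.getElem_append_right (by omega)]
      simp [hpre_len]
    have htake1 : ys.take (i + 1) = ys.take i ++ [ys[i]] := List.take_succ_eq_append_getElem hi
    by_cases hm : pvMatch term key ys[i]
    case pos =>
      have hvnotpre : ys[i] ∉ ((ys.take i).filter (pvMatch term key)).reverse ++ (ys.take i).filter (fun a => !pvMatch term key a) := by
        intro hmem
        have : ys[i] ∈ ys.take i := by
          rcases List.mem_append.mp hmem with h1 | h2
          · exact List.mem_of_mem_filter (List.mem_reverse.mp h1)
          · exact List.mem_of_mem_filter h2
        exact pv_getElem_not_mem_take ys i hi hnd this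
      have hidx : PySem.List.index? ((((ys.take i).filter (pvMatch term key)).reverse ++ (ys.take i).filter (fun a => !pvMatch term key a)) ++ ys[i] :: ys.drop (i + 1)) ys[i] = some i := by
        rw [PySem.List.index?_eq_some_iff]
        exact ⟨_, _, rfl, hpre_len, hvnotpre⟩
      have herase : ((((ys.take i).filter (pvMatch term key)).reverse ++ (ys.take i).filter (fun a => !pvMatch term key a)) ++ ys[i] :: ys.drop (i + 1)).eraseIdx i
          = (((ys.take i).filter (pvMatch term key)).reverse ++ (ys.take i).filter (fun a => !pvMatch term key a)) ++ ys.drop (i + 1) := by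
        have h0 := pv_eraseIdx_append_cons
          (((ys.take i).filter (pvMatch term key)).reverse ++ (ys.take i).filter (fun a => !pvMatch term key a))
          (ys.drop (i + 1)) ys[i]
        rwa [hpre_len] at h0
      have hpop : PySem.List.pop? ((((ys.take i).filter (pvMatch term key)).reverse ++ (ys.take i).filter (fun a => !pvMatch term key a)) ++ ys[i] :: ys.drop (i + 1)) (i : Int)
          = some (ys[i], (((ys.take i).filter (pvMatch term key)).reverse ++ (ys.take i).filter (fun a => !pvMatch term key a)) ++ ys.drop (i + 1)) := by
        rw [PySem.List.pop?_natCast (h := hilt), hgx, herase]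
      rw [orderArticlesPass, dif_pos hilt]
      simp only [hgx, hm, if_true, hidx, PySem.List.insert_zero]
      have hstep := ih (i + 1)
        (ys[i] :: ((((ys.take i).filter (pvMatch term key)).reverse ++ (ys.take i).filter (fun a => !pvMatch term key a)) ++ ys.drop (i + 1)))
        (by omega)
        (by rw [htake1]
            simp only [List.filter_append, List.reverse_append, List.filter_cons, hm,
              Bool.not_true, List.filter_nil]
            simp [List.append_assoc])
      split
      · next r heq =>
          rw [hpop] at heq
          cases heq
          exact hstep
      · next heq => rw [hpop] at heq; simp at heq
    case neg =>
      rw [orderArticlesPass, dif_pos hilt]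
      simp only [hgx, hm, if_false, Bool.false_eq_true]
      exact ih (i + 1)
        ((((ys.take i).filter (pvMatch term key)).reverse ++ (ys.take i).filter (fun a => !pvMatch term key a)) ++ ys[i] :: ys.drop (i + 1))
        (by omega)
        (by rw [htake1]
            simp only [List.filter_append, List.reverse_append, List.filter_cons, hm,
              Bool.not_false, List.filter_nil]
            simp [List.append_assoc])

lemma pv_pass_eq (term key : String) (ys : List (List (String × String))) (hnd : ys.Nodup) :
    orderArticlesPass term key 0 ys = orderArticlesAltPass term key ys := by
  have := pv_pass_inv term key ys hnd ys.length 0 ys (by omega) (by simp)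
  simpa [orderArticlesAltPass] using this

lemma pv_altPass_perm (term key : String) (ys : List (List (String × String))) :
    (orderArticlesAltPass term key ys).Perm ys := by
  unfold orderArticlesAltPass
  exact ((List.reverse_perm _).append_right _).trans (List.filter_append_perm _ _)

-- ===== VERDICT (by name: the statement is the Claim_ definition above) =====
theorem orderArticles_spec : Claim_equal_orderArticles := by
  intro articles term _hdom hpre
  have hnd : articles.Nodup := hpre.2.imp (fun h heq => h (by rw [heq]))
  unfold Spec_orderArticles orderArticles orderArticles_alt
  rw [pv_pass_eq term "subtitle" articles hnd,
      pv_pass_eq term "title" _ (((pv_altPass_perm term "subtitle" articles)).symm.nodup hnd)]
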